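-- pv_equiv track=rewrite | github.com/ckallum/Daily-Coding-Problem | solutions/#217.py | next_spare_number
-- ===== SOURCE A (Python) =====
-- def next_spare_number(number):
--     num_bin = str(bin(number))[2:]
--     num_bin = list(reversed(num_bin))
--     num_bin.append("0")
--     prev_index = 0
--     for i in range(1, len(num_bin)-1):
--         if num_bin[i] == "1" and num_bin[i - 1] == "1" and num_bin[i + 1] != "1":
--             num_bin[i + 1] = "1"
--             for j in range(i, prev_index - 1, -1):
--                 num_bin[j] = "0"
--             prev_index = i + 1
--
--
--     return int("".join(num_bin[::-1]), base=2)
-- ===== SOURCE B (Python) =====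
-- def next_spare_number(number):
--     # Integer bit arithmetic: repeatedly locate the lowest pair of adjacent set
--     # bits (lowest set bit of n & (n >> 1)) and round n up past that run with a
--     # single add-and-mask; no binary string or list is ever built.
--     n = number
--     while True:
--         c = n & (n >> 1)
--         if c == 0:
--             return n
--         l = c & -c
--         n = (n + 2 * l) & ~(4 * l - 1)
-- ===== Notes on version B (the rewrite author's own statement) =====
-- stated objective: alternative
-- what changed: Replaces A's bit-string rewriting (build bin(n) as a reversed char list, scan every index, patch chars, re-zero a range, reparse with int(...,2)) by pure integer bit arithmetic that repeatedly finds the lowest adjacent-ones pair via c & -c and rounds n up past it with one add-and-mask, never building a string.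
-- outside the precondition, e.g. on next_spare_number(-3): A returns 4, B returns 0; on next_spare_number(-1): A returns 1, B returns 0
import Mathlib
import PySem

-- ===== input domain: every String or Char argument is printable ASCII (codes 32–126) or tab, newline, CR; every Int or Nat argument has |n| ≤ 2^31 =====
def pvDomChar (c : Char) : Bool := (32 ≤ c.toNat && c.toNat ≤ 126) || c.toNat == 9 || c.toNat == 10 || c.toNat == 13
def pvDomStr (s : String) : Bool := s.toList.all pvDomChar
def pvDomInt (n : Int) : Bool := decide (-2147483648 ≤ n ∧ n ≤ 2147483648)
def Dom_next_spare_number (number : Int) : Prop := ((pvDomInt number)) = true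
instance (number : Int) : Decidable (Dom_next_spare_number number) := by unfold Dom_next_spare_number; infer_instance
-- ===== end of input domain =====

-- B replaces A's bit-string rewriting pass by integer arithmetic on the lowest
-- adjacent-ones pair (c & -c, add-and-mask); equal on all number ≥ 0.

-- ===== PORT A =====
-- hand port of int(s, base=2): exact on every string this program can join
-- (binary digits, possibly behind a '0b'/'0B' prefix — which arises only for
-- number < 0, where the sign is sliced off); the sign/whitespace/underscore
-- forms of Python's int() cannot occur here.
def parseBin2 (cs : List Char) : Option Int :=
  let ds := if cs.take 2 = ['0', 'b'] ∨ cs.take 2 = ['0', 'B'] then cs.drop 2 else cs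
  if ds ≠ [] ∧ ds.all (fun c => c = '0' ∨ c = '1') then
    some (ds.foldl (fun a c => 2 * a + (if c = '1' then 1 else 0)) (0 : Int))
  else none

-- loop body of A's for-loop (the if with the inner zeroing loop); state = (num_bin, prev_index)
def aStep (st : List Char × Int) (i : Int) : List Char × Int :=
  if PySem.List.pyGetD st.1 i ' ' = '1' ∧ PySem.List.pyGetD st.1 (i - 1) ' ' = '1' ∧
      PySem.List.pyGetD st.1 (i + 1) ' ' ≠ '1' then
    ((PySem.List.pyRange i (st.2 - 1) (-1)).foldl (fun acc j => PySem.List.pySetD acc j '0')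
        (PySem.List.pySetD st.1 (i + 1) '1'), i + 1)
  else st

def next_spare_number (number : Int) : Int :=
  let num_bin0 : List Char := (PySem.Int.pyBin number).toList          -- str(bin(number))
  let num_bin1 : List Char := PySem.List.slice num_bin0 (some 2) none  -- [2:]
  let num_bin2 : List Char := num_bin1.reverse                         -- list(reversed(...))
  let num_bin : List Char := num_bin2 ++ ['0']                         -- .append("0")
  let fin := (PySem.List.pyRange 1 (PySem.List.len num_bin - 1) 1).foldl aStep (num_bin, 0)
  (parseBin2 ((PySem.List.slice? fin.1 none none (-1)).getD [])).getD 0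

-- ===== PORT B =====
-- the while-True loop of Source B, with fuel making it total (never exhausted on proved inputs)
def bGo : Nat → Int → Int
  | 0, n => n
  | fuel + 1, n =>
    let c := PySem.Int.band n (n >>> (1 : Nat))
    if c = 0 then n
    else
      let l := PySem.Int.band c (-c)
      bGo fuel (PySem.Int.band (n + 2 * l) (Int.not (4 * l - 1)))

def next_spare_number_alt (number : Int) : Int := bGo (number.natAbs + 2) number

-- ===== PRECONDITION & SPEC =====
-- Pre_ excludes negative inputs: there the task (least number whose binary form
-- has no adjacent ones) is not specified, and A and B return different, equally
-- unspecifiable values (A: the answer for |n|, its '-' being sliced off with the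
-- '0b' prefix; B: a nonpositive fixpoint of its bit test).
def Pre_next_spare_number (number : Int) : Prop := 0 ≤ number
instance (number : Int) : Decidable (Pre_next_spare_number number) := by
  unfold Pre_next_spare_number; infer_instance
def pvWitness_next_spare_number : Int := (12)

def Spec_next_spare_number (number : Int) (out : Int) : Prop := out = next_spare_number_alt number
instance (number : Int) (out : Int) : Decidable (Spec_next_spare_number number out) := by
  unfold Spec_next_spare_number; infer_instance

-- ===== CLAIM (what is proved, stated in full; the proofs are below) =====
def Claim_equal_next_spare_number : Prop := ∀ (number : Int), Dom_next_spare_number number →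
  Pre_next_spare_number number → Spec_next_spare_number number (next_spare_number number)

-- ===== LEMMAS AND PROOFS =====

-- ---- basic values of bit lists (LSB first) ----
def bitC (c : Char) : Nat := if c = '1' then 1 else 0
def vC (l : List Char) : Nat := l.foldr (fun c acc => bitC c + 2 * acc) 0
def sparseN (m : Nat) : Prop := m &&& (m >>> 1) = 0
def GoodFor (n m : Nat) : Prop := n ≤ m ∧ sparseN m ∧ ∀ k, sparseN k → n ≤ k → m ≤ k

theorem GoodFor_unique {n a b : Nat} (ha : GoodFor n a) (hb : GoodFor n b) : a = b :=
  Nat.le_antisymm (ha.2.2 b hb.2.1 hb.1) (hb.2.2 a ha.2.1 ha.1)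

theorem vC_cons (c : Char) (l : List Char) : vC (c :: l) = bitC c + 2 * vC l := rfl

theorem vC_append (xs ys : List Char) : vC (xs ++ ys) = vC xs + 2 ^ xs.length * vC ys := by
  induction xs with
  | nil => simp [vC]
  | cons c t ih =>
    simp only [List.cons_append, vC_cons, ih, List.length_cons, pow_succ]
    ring

theorem vC_lt (xs : List Char) : vC xs < 2 ^ xs.length := by
  induction xs with
  | nil => simp [vC]
  | cons c t ih =>
    have : bitC c ≤ 1 := by unfold bitC; split <;> omega
    simp only [vC_cons, List.length_cons, pow_succ]
    omega

theorem vC_replicate_zero (m : Nat) : vC (List.replicate m '0') = 0 := by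
  induction m with
  | zero => rfl
  | succ k ih => simp [List.replicate_succ, vC_cons, ih, bitC]

-- testBit of a value against the character list
theorem vC_testBit (l : List Char) (k : Nat) :
    (vC l).testBit k = decide (l.getD k ' ' = '1') := by
  induction l generalizing k with
  | nil =>
    simp [vC, Nat.testBit, List.getD]
  | cons c t ih =>
    cases k with
    | zero =>
      simp only [vC_cons, Nat.testBit_zero, List.getD_cons_zero]
      unfold bitC; split <;> simp_all <;> omega
    | succ k =>
      have hdiv : (bitC c + 2 * vC t) / 2 = vC t := by unfold bitC; split <;> omega
      simp only [vC_cons, Nat.testBit_succ, hdiv, List.getD_cons_succ, ih]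

-- ---- generic bit lemmas ----
theorem adj_not_sparse {m j : Nat} (h : sparseN m) (h0 : m.testBit j = true)
    (h1 : m.testBit (j + 1) = true) : False := by
  have : (m &&& (m >>> 1)).testBit j = false := by rw [h]; simp
  rw [Nat.testBit_land, Nat.testBit_shiftRight] at this
  rw [h0] at this
  have : m.testBit (1 + j) = false := by simpa using this
  rw [Nat.add_comm] at this
  rw [h1] at this
  exact Bool.noConfusion this

theorem testBit_div_mod (m j : Nat) : m.testBit j = decide (m / 2 ^ j % 2 = 1) := by
  induction j generalizing m with
  | zero => simp [Nat.testBit_zero]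
  | succ k ih =>
    rw [Nat.testBit_succ, ih]
    rw [Nat.div_div_eq_div_mul, pow_succ]
    ring_nf

theorem bits_ge {m j : Nat} (h0 : m.testBit j = true) (h1 : m.testBit (j + 1) = true) :
    3 * 2 ^ j ≤ m % 2 ^ (j + 2) := by
  rw [testBit_div_mod] at h0 h1
  simp only [decide_eq_true_eq] at h0 h1
  have e1 : (2 : Nat) ^ (j + 1) = 2 * 2 ^ j := by ring
  have e2 : (2 : Nat) ^ (j + 2) = 4 * 2 ^ j := by ring
  have hA : m % (4 * 2 ^ j) = m % (2 * 2 ^ j) + (2 * 2 ^ j) * (m / (2 * 2 ^ j) % 2) := by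
    rw [show 4 * 2 ^ j = (2 * 2 ^ j) * 2 by ring]
    exact Nat.mod_mul
  have hB : m % (2 * 2 ^ j) = m % 2 ^ j + 2 ^ j * (m / 2 ^ j % 2) := by
    rw [show 2 * 2 ^ j = 2 ^ j * 2 by ring]
    exact Nat.mod_mul
  rw [← e1] at hA
  rw [h1] at hA
  rw [h0] at hB
  rw [e1] at hA
  rw [e2]
  omega
theorem interval_bits {s j : Nat} (h1 : 3 * 2 ^ j ≤ s) (h2 : s < 2 ^ (j + 2)) :
    s.testBit j = true ∧ s.testBit (j + 1) = true := by
  have hq : s / 2 ^ j = 3 := by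
    refine Nat.div_eq_of_lt_le h1 ?_
    have : (3 + 1) * 2 ^ j = 2 ^ (j + 2) := by ring
    omega
  have hq1 : s / 2 ^ (j + 1) = 1 := by
    refine Nat.div_eq_of_lt_le ?_ ?_
    · have : 1 * 2 ^ (j + 1) = 2 * 2 ^ j := by ring
      omega
    · have : (1 + 1) * 2 ^ (j + 1) = 2 ^ (j + 2) := by ring
      omega
  constructor
  · rw [testBit_div_mod, hq]; decide
  · rw [testBit_div_mod, hq1]; decide

-- no sparse number lies strictly between m and the rounded-up value, when m has
-- adjacent set bits at j, j+1
theorem gap {m j : Nat} (hb0 : m.testBit j = true) (hb1 : m.testBit (j + 1) = true) :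
    ∀ k, sparseN k → m ≤ k → m - m % 2 ^ (j + 2) + 2 ^ (j + 2) ≤ k := by
  intro k hks hmk
  by_contra hlt
  push_neg at hlt
  have hr := bits_ge hb0 hb1
  have hPp : 0 < 2 ^ (j + 2) := Nat.two_pow_pos _
  have hdm := Nat.div_add_mod m (2 ^ (j + 2))
  have hmm := Nat.mod_lt m hPp
  set s := k - (m - m % 2 ^ (j + 2)) with hs_def
  have hsge : m % 2 ^ (j + 2) ≤ s := by omega
  have hslt : s < 2 ^ (j + 2) := by omega
  have he : k = s + 2 ^ (j + 2) * (m / 2 ^ (j + 2)) := by omega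
  have hkmod : k % 2 ^ (j + 2) = s := by
    rw [he, Nat.add_mul_mod_self_left, Nat.mod_eq_of_lt hslt]
  obtain ⟨t0, t1⟩ := interval_bits (show 3 * 2 ^ j ≤ s by omega) hslt
  rw [← hkmod, Nat.testBit_mod_two_pow] at t0 t1
  simp only [Bool.and_eq_true, decide_eq_true_eq] at t0 t1
  exact adj_not_sparse hks t0.2 t1.2
theorem sparse_two_pow (k : Nat) : sparseN (2 ^ k) := by
  unfold sparseN
  apply Nat.eq_of_testBit_eq
  intro t
  rw [Nat.testBit_land, Nat.testBit_shiftRight, Nat.testBit_two_pow, Nat.testBit_two_pow,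
    Nat.zero_testBit]
  simp only [Bool.and_eq_false_iff, decide_eq_false_iff_not]
  omega

theorem sparse_zero : sparseN 0 := by simp [sparseN]

theorem exists_sparse_ge (n : Nat) : ∃ M, sparseN M ∧ n ≤ M ∧ M ≤ 2 * n + 1 := by
  rcases Nat.eq_zero_or_pos n with h | h
  · exact ⟨0, sparse_zero, by omega, by omega⟩
  · refine ⟨2 ^ (Nat.log2 n + 1), sparse_two_pow _, Nat.le_of_lt Nat.lt_log2_self, ?_⟩
    have h2 : 2 ^ Nat.log2 n ≤ n := Nat.log2_self_le (by omega)
    have : 2 ^ (Nat.log2 n + 1) = 2 * 2 ^ Nat.log2 n := by ring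
    omega

-- ---- lowest set bit via c & (c-1) ----
theorem land_shift (a b : Nat) (r s : Nat) (hr : r ≤ 1) (hs : s ≤ 1) :
    (2 * a + r) &&& (2 * b + s) = 2 * (a &&& b) + (r &&& s) := by
  have hrs : r &&& s ≤ 1 := by
    interval_cases r <;> interval_cases s <;> decide
  apply Nat.eq_of_testBit_eq
  intro t
  cases t with
  | zero =>
    rw [Nat.testBit_land, Nat.testBit_zero, Nat.testBit_zero, Nat.testBit_zero]
    interval_cases r <;> interval_cases s <;> simp [Nat.add_mul_mod_self_left, Nat.mul_add_mod]
  | succ t =>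
    rw [Nat.testBit_land, Nat.testBit_succ, Nat.testBit_succ, Nat.testBit_succ]
    have d1 : (2 * a + r) / 2 = a := by omega
    have d2 : (2 * b + s) / 2 = b := by omega
    have d3 : (2 * (a &&& b) + (r &&& s)) / 2 = a &&& b := by omega
    rw [d1, d2, d3, Nat.testBit_land]

theorem lowbit (c : Nat) (hc : c ≠ 0) :
    ∃ j, c &&& (c - 1) = c - 2 ^ j ∧ c.testBit j = true ∧ 2 ^ j ≤ c := by
  induction c using Nat.strong_induction_on with
  | _ c ih =>
    rcases Nat.mod_two_eq_zero_or_one c with hm | hm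
    · -- even: c = 2 * d with d ≠ 0
      obtain ⟨d, rfl⟩ : ∃ d, c = 2 * d := ⟨c / 2, by omega⟩
      have hdz : d ≠ 0 := by omega
      obtain ⟨j, e, tb, le⟩ := ih d (by omega) hdz
      refine ⟨j + 1, ?_, ?_, ?_⟩
      · have key : (2 * d) &&& (2 * d - 1) = 2 * (d &&& (d - 1)) + (0 &&& 1) := by
          rw [show 2 * d - 1 = 2 * (d - 1) + 1 by omega]
          have := land_shift d (d - 1) 0 1 (by omega) (by omega)
          simpa using this
        rw [key, e]
        have h01 : (0 : Nat) &&& 1 = 0 := by decide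
        have hpow : (2 : Nat) ^ (j + 1) = 2 * 2 ^ j := by ring
        omega
      · rw [Nat.testBit_succ]
        simpa using tb
      · have hpow : (2 : Nat) ^ (j + 1) = 2 * 2 ^ j := by ring
        omega
    · -- odd: c = 2 * d + 1
      obtain ⟨d, rfl⟩ : ∃ d, c = 2 * d + 1 := ⟨c / 2, by omega⟩
      refine ⟨0, ?_, ?_, ?_⟩
      · have key : (2 * d + 1) &&& (2 * d + 1 - 1) = 2 * (d &&& d) + (1 &&& 0) := by
          rw [show 2 * d + 1 - 1 = 2 * d + 0 by omega]
          exact land_shift d d 1 0 (by omega) (by omega)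
        have hself : d &&& d = d := by
          apply Nat.eq_of_testBit_eq
          intro t
          rw [Nat.testBit_land, Bool.and_self]
        rw [key, hself]
        have h10 : (1 : Nat) &&& 0 = 0 := by decide
        omega
      · rw [Nat.testBit_zero]
        simp [Nat.mul_add_mod]
      · simp

-- ---- Int bridges ----
theorem int_shift1 (m : Nat) : ((m : Int) >>> (1 : Nat)) = ((m >>> 1 : Nat) : Int) := rfl

theorem int_not_nonneg (a : Nat) : Int.not (a : Int) = -(a : Int) - 1 := by
  show Int.not (Int.ofNat a) = _
  unfold Int.not
  simp [Int.negSucc_eq]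
  omega

theorem band_nonneg_neg (a p : Nat) (hp : 0 < p) :
    PySem.Int.band (a : Int) (-(p : Int)) = ((a - (a &&& (p - 1)) : Nat) : Int) := by
  unfold PySem.Int.band
  rw [if_pos (Int.natCast_nonneg a), if_neg (by omega)]
  have h1 : (-(-((p : Nat) : Int)) - 1) = (((p - 1 : Nat) : Nat) : Int) := by
    push_cast [hp]
    omega
  rw [h1]
  simp

-- ---- B correctness ----
theorem bGo_good (n M : Nat) (hM : sparseN M) (hMn : n ≤ M) :
    ∀ (fuel m : Nat), n ≤ m → (∀ k, sparseN k → n ≤ k → m ≤ k) → M + 1 ≤ m + fuel →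
      ∃ r : Nat, bGo fuel (m : Int) = (r : Int) ∧ GoodFor n r := by
  intro fuel
  induction fuel with
  | zero =>
    intro m hm hinv hfuel
    exfalso
    have := hinv M hM hMn
    omega
  | succ f ih =>
    intro m hm hinv hfuel
    have hcast : PySem.Int.band (m : Int) ((m : Int) >>> (1 : Nat)) = ((m &&& (m >>> 1) : Nat) : Int) := by
      rw [int_shift1, PySem.Int.band_natCast]
    by_cases h0 : m &&& (m >>> 1) = 0
    · refine ⟨m, ?_, hm, h0, hinv⟩
      rw [bGo]
      simp [hcast, h0]
    · obtain ⟨j, hj1, hj2, hj3⟩ := lowbit _ h0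
      have hcpos : 0 < m &&& (m >>> 1) := Nat.pos_of_ne_zero h0
      rw [Nat.testBit_land, Nat.testBit_shiftRight] at hj2
      obtain ⟨bm0, bm1⟩ := Bool.and_eq_true_iff.mp hj2
      have bm1' : m.testBit (j + 1) = true := by rw [Nat.add_comm]; exact bm1
      -- Nat-level arithmetic first (kept free of Int facts for omega)
      have hr := bits_ge bm0 bm1'
      have h2j : (1:Nat) ≤ 2 ^ j := Nat.one_le_two_pow
      have hPq : (2:Nat) ^ (j + 2) = 2 ^ j * 2 * 2 := by ring
      have hPq' : (2:Nat) ^ (j + 1) = 2 ^ j * 2 := by ring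
      have hPpos : (0:Nat) < 2 ^ (j + 2) := Nat.two_pow_pos _
      have hmodlt : m % 2 ^ (j + 2) < 2 ^ (j + 2) := Nat.mod_lt m hPpos
      have hRm : m % 2 ^ (j + 2) ≤ m := Nat.mod_le m _
      have hlt1 : (2:Nat) ^ (j + 1) < 2 ^ (j + 2) := by omega
      obtain ⟨R, hR⟩ : ∃ R, m % 2 ^ (j + 2) = R := ⟨_, rfl⟩
      rw [hR] at hr hmodlt hRm
      have hmod2 : (m + 2 ^ (j + 1)) % 2 ^ (j + 2) = R + 2 ^ (j + 1) - 2 ^ (j + 2) := by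
        rw [Nat.add_mod, hR, Nat.mod_eq_of_lt hlt1,
          Nat.mod_eq_sub_mod (by omega), Nat.mod_eq_of_lt (by omega)]
      obtain ⟨A, hA⟩ : ∃ A, (m + 2 ^ (j + 1)) % 2 ^ (j + 2) = A := ⟨_, rfl⟩
      rw [hA] at hmod2
      have hstep : ∀ k, sparseN k → n ≤ k → (m + 2 ^ (j + 1)) - A ≤ k := by
        intro k hks hnk
        have hg := gap bm0 bm1' k hks (hinv k hks hnk)
        rw [hR] at hg
        omega
      have hm2ge : m + 1 ≤ (m + 2 ^ (j + 1)) - A := by omega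
      obtain ⟨r, hrEq, hrGood⟩ := ih ((m + 2 ^ (j + 1)) - A) (by omega) hstep (by omega)
      -- Int-level evaluation of one loop step
      have hl : PySem.Int.band ((m &&& (m >>> 1) : Nat) : Int) (-((m &&& (m >>> 1) : Nat) : Int))
          = ((2 ^ j : Nat) : Int) := by
        rw [band_nonneg_neg _ _ hcpos, hj1, Nat.sub_sub_self hj3]
      have ha : ((m : Int) + 2 * ((2 ^ j : Nat) : Int)) = ((m + 2 ^ (j + 1) : Nat) : Int) := by
        push_cast
        have : (2 : Int) ^ (j + 1) = 2 * 2 ^ j := by ring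
        omega
      have hp2 : (1 : Nat) ≤ 2 ^ (j + 2) := Nat.one_le_two_pow
      have hnot : (4 * ((2 ^ j : Nat) : Int) - 1) = (((2 ^ (j + 2) - 1 : Nat) : Nat) : Int) := by
        push_cast [hp2]
        have : (2 : Int) ^ (j + 2) = 4 * 2 ^ j := by ring
        omega
      have hnot2 : Int.not (((2 ^ (j + 2) - 1 : Nat) : Nat) : Int) = -(((2 ^ (j + 2) : Nat) : Nat) : Int) := by
        rw [int_not_nonneg]
        push_cast [hp2]
        omega
      have hband2 : PySem.Int.band ((m + 2 ^ (j + 1) : Nat) : Int) (-(((2 ^ (j + 2) : Nat) : Nat) : Int))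
          = (((m + 2 ^ (j + 1)) - (m + 2 ^ (j + 1)) % 2 ^ (j + 2) : Nat) : Int) := by
        rw [band_nonneg_neg _ _ (by positivity), Nat.and_two_pow_sub_one_eq_mod]
      refine ⟨r, ?_, hrGood⟩
      rw [bGo]
      simp only [hcast]
      rw [if_neg (by exact_mod_cast h0)]
      simp only [hl, ha, hnot, hnot2, hband2]
      rw [hA]
      exact hrEq

theorem alt_good (n : Nat) : ∃ r : Nat, next_spare_number_alt (n : Int) = (r : Int) ∧ GoodFor n r := by
  obtain ⟨M, hM, hMn, hMb⟩ := exists_sparse_ge n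
  have h := bGo_good n M hM hMn (n + 2) n (le_refl n) (fun k _ h => h) (by omega)
  simpa [next_spare_number_alt] using h

-- ---- A-side: initial list ----
def bitsOf (n : Nat) : List Char :=
  if n = 0 then [] else (if n % 2 = 1 then '1' else '0') :: bitsOf (n / 2)
decreasing_by exact Nat.div_lt_self (by omega) (by omega)

theorem vC_bitsOf (n : Nat) : vC (bitsOf n) = n := by
  induction n using Nat.strong_induction_on with
  | _ n ih =>
    rcases Nat.eq_zero_or_pos n with h | h
    · subst h; rw [bitsOf]; rfl
    · rw [bitsOf]
      simp only [if_neg (by omega : ¬ n = 0), vC_cons]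
      rw [ih (n / 2) (Nat.div_lt_self h (by omega))]
      unfold bitC
      rcases Nat.mod_two_eq_zero_or_one n with h2 | h2 <;> simp [h2] <;> omega

theorem bitsOf_ok (n : Nat) : ∀ c ∈ bitsOf n, c = '0' ∨ c = '1' := by
  induction n using Nat.strong_induction_on with
  | _ n ih =>
    rcases Nat.eq_zero_or_pos n with h | h
    · subst h; rw [bitsOf]; simp
    · rw [bitsOf]
      simp only [if_neg (by omega : ¬ n = 0)]
      intro c hc
      rcases List.mem_cons.1 hc with h' | h'
      · subst h'; split <;> simp
      · exact ih (n / 2) (Nat.div_lt_self h (by omega)) c h'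

theorem toDigitsCore_eq (fuel : Nat) : ∀ (n : Nat) (ds : List Char), n ≠ 0 → n ≤ fuel →
    Nat.toDigitsCore 2 fuel n ds = (bitsOf n).reverse ++ ds := by
  induction fuel with
  | zero => intro n ds h hle; omega
  | succ f ih =>
    intro n ds h hle
    rw [Nat.toDigitsCore]
    have hd : (n % 2).digitChar = if n % 2 = 1 then '1' else '0' := by
      rcases Nat.mod_two_eq_zero_or_one n with h2 | h2 <;> rw [h2] <;> rfl
    by_cases h2 : n / 2 = 0
    · have hn1 : n = 1 := by omega
      subst hn1
      rw [if_pos h2]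
      rw [bitsOf]
      norm_num
      rw [bitsOf]
      rfl
    · rw [if_neg h2, ih (n / 2) _ h2 (by omega)]
      conv_rhs => rw [bitsOf]
      rw [if_neg h, List.reverse_cons, hd]
      simp

theorem toDigits_two (n : Nat) :
    Nat.toDigits 2 n = if n = 0 then ['0'] else (bitsOf n).reverse := by
  rcases Nat.eq_zero_or_pos n with h | h
  · subst h; rfl
  · rw [Nat.toDigits, toDigitsCore_eq (n + 1) n [] (by omega) (by omega)]
    simp [if_neg (by omega : ¬ n = 0)]

-- ---- A-side: parse of the final list ----
theorem foldr_int_vC (l : List Char) :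
    l.foldr (fun c (a : Int) => 2 * a + (if c = '1' then 1 else 0)) 0 = ((vC l : Nat) : Int) := by
  induction l with
  | nil => rfl
  | cons c t ih =>
    simp only [List.foldr_cons, ih, vC_cons, bitC]
    push_cast
    split <;> ring

theorem parseBin2_val (l : List Char) (hne : l ≠ [])
    (hok : ∀ c ∈ l, c = '0' ∨ c = '1') :
    parseBin2 l.reverse = some ((vC l : Nat) : Int) := by
  have hpre : ¬(l.reverse.take 2 = ['0', 'b'] ∨ l.reverse.take 2 = ['0', 'B']) := by
    rintro (h | h)
    · have hb : 'b' ∈ l.reverse.take 2 := by rw [h]; simp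
      have := hok _ (List.mem_reverse.1 (List.take_subset _ _ hb))
      simp at this
    · have hb : 'B' ∈ l.reverse.take 2 := by rw [h]; simp
      have := hok _ (List.mem_reverse.1 (List.take_subset _ _ hb))
      simp at this
  have hne' : l.reverse ≠ [] := by
    simpa using hne
  have hall : l.reverse.all (fun c => decide (c = '0' ∨ c = '1')) = true := by
    rw [List.all_eq_true]
    intro c hc
    exact decide_eq_true (hok c (List.mem_reverse.1 hc))
  unfold parseBin2
  simp only [if_neg hpre]
  rw [if_pos ⟨hne', hall⟩, List.foldl_reverse, foldr_int_vC]

-- ---- A-side: the zeroing inner loop ----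
theorem getD_set (l : List Char) (i k : Nat) (v : Char) :
    (l.set i v).getD k ' ' = if i = k ∧ i < l.length then v else l.getD k ' ' := by
  rw [List.getD_eq_getElem?_getD, List.getD_eq_getElem?_getD, List.getElem?_set]
  by_cases h1 : i = k
  · subst h1
    by_cases h2 : i < l.length
    · rw [if_pos rfl, if_pos h2, if_pos ⟨rfl, h2⟩]
      rfl
    · rw [if_pos rfl, if_neg h2, if_neg (by tauto)]
      rw [List.getElem?_eq_none (by omega)]
  · rw [if_neg h1, if_neg (by tauto)]

theorem zero_fold_getD (a b : Int) (l : List Char) (hb : 0 ≤ b + 1) (hab : b ≤ a)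
    (ha : a < l.length) :
    ((PySem.List.pyRange a b (-1)).foldl (fun acc j => PySem.List.pySetD acc j '0') l).length
        = l.length ∧
    ∀ k : Nat, ((PySem.List.pyRange a b (-1)).foldl
        (fun acc j => PySem.List.pySetD acc j '0') l).getD k ' '
      = if b < (k : Int) ∧ (k : Int) ≤ a then '0' else l.getD k ' ' := by
  have main : ∀ (d : Nat) (a : Int) (l : List Char), (a - b).toNat = d → 0 ≤ b + 1 → b ≤ a →
      (a : Int) < l.length →
      ((PySem.List.pyRange a b (-1)).foldl (fun acc j => PySem.List.pySetD acc j '0') l).length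
          = l.length ∧
      ∀ k : Nat, ((PySem.List.pyRange a b (-1)).foldl
          (fun acc j => PySem.List.pySetD acc j '0') l).getD k ' '
        = if b < (k : Int) ∧ (k : Int) ≤ a then '0' else l.getD k ' ' := by
    intro d
    induction d with
    | zero =>
      intro a l hd hb hab ha
      have hba : a ≤ b := by omega
      rw [PySem.List.pyRange_neg_one_eq_nil hba]
      refine ⟨rfl, fun k => ?_⟩
      rw [if_neg (by omega)]
      rfl
    | succ d ihd =>
      intro a l hd hb hab ha
      have hba : b < a := by omega
      rw [PySem.List.pyRange_neg_one_cons hba, List.foldl_cons,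
        PySem.List.pySetD_of_nonneg _ _ (by omega)]
      have hlen : (l.set a.toNat '0').length = l.length := by simp
      obtain ⟨ih1, ih2⟩ := ihd (a - 1) (l.set a.toNat '0') (by omega) hb (by omega)
        (by rw [hlen]; omega)
      refine ⟨by rw [ih1, hlen], fun k => ?_⟩
      rw [ih2 k, getD_set]
      have haN : a.toNat < l.length := by omega
      by_cases h1 : b < (k : Int) ∧ (k : Int) ≤ a - 1
      · rw [if_pos h1, if_pos (by omega)]
      · rw [if_neg h1]
        by_cases h2 : (k : Int) = a
        · rw [if_pos (by omega), if_pos (by constructor <;> omega)]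
        · rw [if_neg (by omega), if_neg (by intro hcon; omega)]
  exact main (a - b).toNat a l rfl hb hab ha

-- ---- A-side: loop invariant ----
def AInv (n N : Nat) (j : Nat) (st : List Char × Int) : Prop :=
  st.1.length = N ∧
  (0 ≤ st.2 ∧ st.2.toNat ≤ j ∧ st.2 = (st.2.toNat : Int)) ∧
  (∀ k : Nat, k < st.2.toNat → st.1.getD k ' ' = '0') ∧
  (∀ k : Nat, k + 1 < j → st.1.getD k ' ' = '1' → st.1.getD (k + 1) ' ' = '1' →
      ∀ t : Nat, k ≤ t → t ≤ j → st.1.getD t ' ' = '1') ∧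
  (st.1.getD (N - 1) ' ' = '1' → ∀ k, k < N - 1 → st.1.getD k ' ' = '0') ∧
  (∀ k : Nat, k < N → st.1.getD k ' ' = '0' ∨ st.1.getD k ' ' = '1') ∧
  n ≤ vC st.1 ∧ (∀ m, sparseN m → n ≤ m → vC st.1 ≤ m)

theorem ext_getD {l1 l2 : List Char} (hlen : l1.length = l2.length)
    (h : ∀ k, k < l1.length → l1.getD k ' ' = l2.getD k ' ') : l1 = l2 := by
  apply List.ext_getElem hlen
  intro i h1 h2
  have hh := h i h1
  rwa [List.getD_eq_getElem _ _ h1, List.getD_eq_getElem _ _ h2] at hh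

theorem aStep_inv {n N j : Nat} {st : List Char × Int} (hInv : AInv n N j st)
    (hj1 : 1 ≤ j) (hj2 : j ≤ N - 2) (hN : 2 ≤ N) :
    AInv n N (j + 1) (aStep st (j : Int)) := by
  obtain ⟨l, p⟩ := st
  obtain ⟨hLen, ⟨hp0, hpj, hpc⟩, hPrev, hRun, hTop, hOk, hVlo, hVhi⟩ := hInv
  dsimp only at hLen hPrev hRun hTop hOk hVlo hVhi hp0 hpj hpc
  unfold aStep
  dsimp only
  have hjN : j + 1 < N := by omega
  have g0 : PySem.List.pyGetD l ((j : Int)) ' ' = l.getD j ' ' := PySem.List.pyGetD_natCast l j ' '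
  have g1 : PySem.List.pyGetD l ((j : Int) - 1) ' ' = l.getD (j - 1) ' ' := by
    rw [show ((j : Int) - 1) = ((j - 1 : Nat) : Int) by omega]
    exact PySem.List.pyGetD_natCast l (j - 1) ' '
  have g2 : PySem.List.pyGetD l ((j : Int) + 1) ' ' = l.getD (j + 1) ' ' := by
    rw [show ((j : Int) + 1) = ((j + 1 : Nat) : Int) by push_cast; ring]
    exact PySem.List.pyGetD_natCast l (j + 1) ' '
  split_ifs with hc
  · -- fix branch
    rw [g0, g1, g2] at hc
    obtain ⟨c1, c0, c2⟩ := hc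
    have hg2 : l.getD (j + 1) ' ' = '0' := by
      rcases hOk (j + 1) (by omega) with h | h
      · exact h
      · exact absurd h c2
    have hset : PySem.List.pySetD l ((j : Int) + 1) '1' = l.set (j + 1) '1' := by
      rw [show ((j : Int) + 1) = ((j + 1 : Nat) : Int) by push_cast; ring]
      simp only [PySem.List.pySetD_natCast]
    rw [hset]
    have hlenset : (l.set (j + 1) '1').length = l.length := by simp
    obtain ⟨zlen, zget⟩ := zero_fold_getD (j : Int) (p - 1) (l.set (j + 1) '1')
      (by omega) (by omega) (by rw [hlenset]; omega)
    have hG : ∀ k : Nat, ((PySem.List.pyRange (j : Int) (p - 1) (-1)).foldl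
        (fun acc j => PySem.List.pySetD acc j '0') (l.set (j + 1) '1')).getD k ' '
        = if k = j + 1 then '1' else if p.toNat ≤ k ∧ k ≤ j then '0' else l.getD k ' ' := by
      intro k
      rw [zget k, getD_set]
      by_cases e1 : k = j + 1
      · subst e1
        rw [if_neg (by omega), if_pos ⟨rfl, by omega⟩, if_pos rfl]
      · by_cases e2 : p.toNat ≤ k ∧ k ≤ j
        · rw [if_pos (by omega), if_neg e1, if_pos e2]
        · rw [if_neg (by omega), if_neg (by omega), if_neg e1, if_neg e2]
    have hLenr : ((PySem.List.pyRange (j : Int) (p - 1) (-1)).foldl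
        (fun acc j => PySem.List.pySetD acc j '0') (l.set (j + 1) '1')).length = N := by
      rw [zlen, hlenset, hLen]
    have hlenTake : (l.take (j + 2)).length = j + 2 := by
      rw [List.length_take]; omega
    have hvr : (PySem.List.pyRange (j : Int) (p - 1) (-1)).foldl
        (fun acc j => PySem.List.pySetD acc j '0') (l.set (j + 1) '1')
        = List.replicate (j + 1) '0' ++ '1' :: l.drop (j + 2) := by
      apply ext_getD
      · rw [hLenr]
        simp only [List.length_append, List.length_replicate, List.length_cons,
          List.length_drop]
        omega
      · intro k hk
        rw [hG k]
        by_cases e1 : k < j + 1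
        · have hr1 : (List.replicate (j + 1) '0' ++ '1' :: l.drop (j + 2)).getD k ' ' = '0' := by
            rw [List.getD_eq_getElem?_getD,
              List.getElem?_append_left (by simpa using e1),
              List.getElem?_replicate, if_pos e1]
            rfl
          rw [hr1, if_neg (by omega)]
          by_cases e2 : p.toNat ≤ k
          · rw [if_pos ⟨e2, by omega⟩]
          · rw [if_neg (by omega)]
            exact hPrev k (by omega)
        · by_cases e3 : k = j + 1
          · have hr2 : (List.replicate (j + 1) '0' ++ '1' :: l.drop (j + 2)).getD k ' ' = '1' := by
              rw [List.getD_eq_getElem?_getD,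
                List.getElem?_append_right (by simp only [List.length_replicate]; omega)]
              simp only [List.length_replicate]
              rw [show k - (j + 1) = 0 by omega]
              rfl
            rw [hr2, if_pos e3]
          · have hr3 : (List.replicate (j + 1) '0' ++ '1' :: l.drop (j + 2)).getD k ' '
                = l.getD k ' ' := by
              rw [List.getD_eq_getElem?_getD,
                List.getElem?_append_right (by simp only [List.length_replicate]; omega)]
              simp only [List.length_replicate]
              rw [show k - (j + 1) = (k - (j + 2)) + 1 by omega,
                List.getElem?_cons_succ, List.getElem?_drop,
                show j + 2 + (k - (j + 2)) = k by omega,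
                ← List.getD_eq_getElem?_getD]
            rw [hr3, if_neg e3, if_neg (by omega)]
    have hvCr : vC ((PySem.List.pyRange (j : Int) (p - 1) (-1)).foldl
        (fun acc j => PySem.List.pySetD acc j '0') (l.set (j + 1) '1'))
        = 2 ^ (j + 1) * (1 + 2 * vC (l.drop (j + 2))) := by
      rw [hvr, vC_append, vC_replicate_zero, List.length_replicate, vC_cons]
      simp [bitC]
    have hWdec : vC l = vC (l.take (j + 2)) + 2 ^ (j + 2) * vC (l.drop (j + 2)) := by
      conv_lhs => rw [← List.take_append_drop (j + 2) l]
      rw [vC_append, hlenTake]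
    have htake_lt : vC (l.take (j + 2)) < 2 ^ (j + 2) := by
      have h := vC_lt (l.take (j + 2))
      rw [hlenTake] at h
      exact h
    have hw0 : (vC l).testBit (j - 1) = true := by rw [vC_testBit, c0]; simp
    have hw1 : (vC l).testBit j = true := by rw [vC_testBit, c1]; simp
    have hw2 : (vC l).testBit (j + 1) = false := by rw [vC_testBit, hg2]; simp
    have hmodW : vC l % 2 ^ (j + 2) = vC (l.take (j + 2)) := by
      conv_lhs => rw [hWdec]
      rw [Nat.add_mul_mod_self_left, Nat.mod_eq_of_lt htake_lt]
    have hmodW1 : vC l % 2 ^ (j + 2) = vC l % 2 ^ (j + 1) := by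
      have hmm : vC l % (2 ^ (j + 1) * 2)
          = vC l % 2 ^ (j + 1) + 2 ^ (j + 1) * (vC l / 2 ^ (j + 1) % 2) := Nat.mod_mul
      have hz : vC l / 2 ^ (j + 1) % 2 = 0 := by
        have h := hw2
        rw [testBit_div_mod] at h
        simp only [decide_eq_false_iff_not] at h
        omega
      calc vC l % 2 ^ (j + 2) = vC l % (2 ^ (j + 1) * 2) := by rw [pow_succ]
        _ = vC l % 2 ^ (j + 1) + 2 ^ (j + 1) * 0 := by rw [hmm, hz]
        _ = vC l % 2 ^ (j + 1) := by omega
    have hprod : (2 : Nat) ^ (j + 1) * (1 + 2 * vC (l.drop (j + 2)))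
        = 2 ^ (j + 2) * vC (l.drop (j + 2)) + 2 ^ (j + 1) := by ring
    have hmlt : vC l % 2 ^ (j + 1) < 2 ^ (j + 1) := Nat.mod_lt _ (Nat.two_pow_pos _)
    have hform : vC ((PySem.List.pyRange (j : Int) (p - 1) (-1)).foldl
        (fun acc j => PySem.List.pySetD acc j '0') (l.set (j + 1) '1'))
        = vC l - vC l % 2 ^ (j + 1) + 2 ^ (j + 1) := by
      rw [hvCr, hprod, ← hmodW1]
      omega
    refine ⟨hLenr, ⟨by omega, ?_, ?_⟩, ?_, ?_, ?_, ?_, ?_, ?_⟩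
    · dsimp only
      rw [show ((j : Int) + 1) = ((j + 1 : Nat) : Int) by push_cast; ring, Int.toNat_natCast]
    · dsimp only
      rw [show ((j : Int) + 1) = ((j + 1 : Nat) : Int) by push_cast; ring, Int.toNat_natCast]
    · -- zeros below prev
      dsimp only
      intro k hk
      rw [show ((j : Int) + 1) = ((j + 1 : Nat) : Int) by push_cast; ring,
        Int.toNat_natCast] at hk
      rw [hG k, if_neg (by omega)]
      by_cases e2 : p.toNat ≤ k
      · rw [if_pos ⟨e2, by omega⟩]
      · rw [if_neg (by omega)]
        exact hPrev k (by omega)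
    · -- run invariant: everything below j+1 is zero, so no conflict pair
      dsimp only
      intro k hk h1 h2 t ht1 ht2
      exfalso
      rw [hG k, if_neg (by omega)] at h1
      by_cases e2 : p.toNat ≤ k
      · rw [if_pos ⟨e2, by omega⟩] at h1
        exact absurd h1 (by decide)
      · rw [if_neg (by omega)] at h1
        rw [hPrev k (by omega)] at h1
        exact absurd h1 (by decide)
    · -- top bit
      dsimp only
      intro hN1 k hk
      by_cases e1 : j + 1 = N - 1
      · rw [hG k, if_neg (by omega)]
        by_cases e2 : p.toNat ≤ k
        · rw [if_pos ⟨e2, by omega⟩]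
        · rw [if_neg (by omega)]
          exact hPrev k (by omega)
      · rw [hG (N - 1), if_neg (by omega), if_neg (by omega)] at hN1
        have := hTop hN1 j (by omega)
        rw [c1] at this
        exact absurd this (by decide)
    · -- chars are 0/1
      dsimp only
      intro k hk
      rw [hG k]
      split_ifs with e1 e2
      · right; rfl
      · left; rfl
      · exact hOk k hk
    · -- n ≤ value
      dsimp only
      rw [hform]
      omega
    · -- minimal among sparse
      dsimp only
      intro m hm hnm
      have hb := hVhi m hm hnm
      have e1 : j - 1 + 1 = j := by omega
      have e2 : j - 1 + 2 = j + 1 := by omega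
      have hg := gap (m := vC l) (j := j - 1) hw0 (by rw [e1]; exact hw1) m hm hb
      rw [e2] at hg
      rw [hform]
      omega
  · -- no-fix branch
    rw [g0, g1, g2] at hc
    refine ⟨hLen, ⟨hp0, by omega, hpc⟩, hPrev, ?_, hTop, hOk, hVlo, hVhi⟩
    dsimp only
    intro k hk h1 h2 t ht1 ht2
    have hGj1 : l.getD (j + 1) ' ' = '1' := by
      rcases Nat.lt_or_ge (k + 1) j with hkj | hkj
      · have e1 : l.getD (j - 1) ' ' = '1' := hRun k hkj h1 h2 (j - 1) (by omega) (by omega)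
        have e2 : l.getD j ' ' = '1' := hRun k hkj h1 h2 j (by omega) (by omega)
        by_contra hne
        exact hc ⟨e2, e1, hne⟩
      · have hkj' : k + 1 = j := by omega
        have e1 : l.getD (j - 1) ' ' = '1' := by rw [show j - 1 = k by omega]; exact h1
        have e2 : l.getD j ' ' = '1' := by rw [← hkj']; exact h2
        by_contra hne
        exact hc ⟨e2, e1, hne⟩
    rcases Nat.lt_or_ge t (j + 1) with htj | htj
    · rcases Nat.lt_or_ge (k + 1) j with hkj | hkj
      · exact hRun k hkj h1 h2 t ht1 (by omega)
      · have hkj' : k + 1 = j := by omega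
        rcases Nat.eq_or_lt_of_le ht1 with he | hlt2
        · rw [← he]; exact h1
        · have ht' : t = j := by omega
          rw [ht', ← hkj']
          exact h2
    · have ht' : t = j + 1 := by omega
      rw [ht']
      exact hGj1

theorem aLoop_inv (n N : Nat) (l0 : List Char) (hN : l0.length = N) (hN2 : 2 ≤ N)
    (h0 : AInv n N 1 (l0, 0)) :
    ∀ j : Nat, 1 ≤ j → j ≤ N - 1 →
      AInv n N j ((PySem.List.pyRange 1 (j : Int) 1).foldl aStep (l0, 0)) := by
  intro j
  induction j with
  | zero => intro h; omega
  | succ jj ihj =>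
    intro h1 h2
    rcases Nat.eq_zero_or_pos jj with hz | hp
    · subst hz
      rw [PySem.List.pyRange_one_eq_nil (by norm_num)]
      exact h0
    · have hcast : ((jj + 1 : Nat) : Int) = ((jj : Nat) : Int) + 1 := by push_cast; ring
      rw [hcast, PySem.List.pyRange_one_succ_right (by exact_mod_cast hp), List.foldl_append,
        List.foldl_cons, List.foldl_nil]
      exact aStep_inv (ihj (by omega) (by omega)) hp (by omega) hN2

theorem sparse_of_noadj (l : List Char)
    (h : ∀ k : Nat, k + 1 < l.length → ¬(l.getD k ' ' = '1' ∧ l.getD (k + 1) ' ' = '1')) :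
    sparseN (vC l) := by
  unfold sparseN
  apply Nat.eq_of_testBit_eq
  intro t
  rw [Nat.testBit_land, Nat.testBit_shiftRight, Nat.zero_testBit, vC_testBit, vC_testBit]
  by_cases ht : t + 1 < l.length
  · have hna := h t ht
    rw [Nat.add_comm 1 t]
    simp only [Bool.and_eq_false_iff, decide_eq_false_iff_not]
    tauto
  · have hdef : l.getD (1 + t) ' ' = ' ' := List.getD_eq_default _ _ (by omega)
    rw [hdef]
    simp

theorem bitsOf_ne_nil (n : Nat) (hn : n ≠ 0) : bitsOf n ≠ [] := by
  rw [bitsOf]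
  simp [hn]

theorem getD_append_last (xs : List Char) : (xs ++ ['0']).getD xs.length ' ' = '0' := by
  rw [List.getD_eq_getElem?_getD, List.getElem?_append_right (le_refl _)]
  simp

theorem afinal_good (n : Nat) : ∃ r : Nat, next_spare_number (n : Int) = (r : Int) ∧ GoodFor n r := by
  by_cases hn : n = 0
  · subst hn
    exact ⟨0, rfl, le_refl 0, sparse_zero, fun k _ hk => hk⟩
  · have hlb : 1 ≤ (bitsOf n).length := List.length_pos_of_ne_nil (bitsOf_ne_nil n hn)
    set l0 : List Char := bitsOf n ++ ['0'] with hl0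
    set N : Nat := l0.length with hN
    have hNlen : N = (bitsOf n).length + 1 := by rw [hN, hl0]; simp
    have hN2 : 2 ≤ N := by omega
    have hbin : PySem.List.slice ((PySem.Int.pyBin ((n : Nat) : Int)).toList) (some 2) none
        = Nat.toDigits 2 n := by
      rw [PySem.Int.toList_pyBin]
      unfold PySem.Int.toBinChars0b
      rw [if_neg (by omega)]
      rw [PySem.List.slice_from _ (by norm_num)]
      simp
    have hrev : (Nat.toDigits 2 n).reverse = bitsOf n := by
      rw [toDigits_two, if_neg hn, List.reverse_reverse]
    have hval0 : vC l0 = n := by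
      rw [hl0, vC_append, vC_bitsOf]
      simp [vC, bitC]
    have hlast : l0.getD (N - 1) ' ' = '0' := by
      rw [show N - 1 = (bitsOf n).length by omega, hl0]
      exact getD_append_last _
    have hok0 : ∀ k, k < N → l0.getD k ' ' = '0' ∨ l0.getD k ' ' = '1' := by
      intro k hk
      have hmem : l0.getD k ' ' ∈ l0 := by
        rw [List.getD_eq_getElem _ _ (show k < l0.length by omega)]
        exact List.getElem_mem _
      rw [hl0] at hmem
      rcases List.mem_append.1 hmem with h | h
      · exact bitsOf_ok n _ h
      · left; simpa using h
    have hInv0 : AInv n N 1 (l0, 0) := by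
      refine ⟨hN.symm, ⟨by norm_num, by simp, by simp⟩, ?_, ?_, ?_, hok0, ?_, ?_⟩
      · intro k hk
        simp at hk
      · intro k hk
        omega
      · intro h k hk
        rw [hlast] at h
        simp at h
      · rw [hval0]
      · intro m _ hm
        rw [hval0]
        exact hm
    have hstep := aLoop_inv n N l0 hN.symm hN2 hInv0 (N - 1) (by omega) (le_refl _)
    obtain ⟨hLenF, -, -, hRunF, hTopF, hOkF, hVloF, hVhiF⟩ := hstep
    have hnadj : ∀ k : Nat,
        k + 1 < ((PySem.List.pyRange 1 ((N - 1 : Nat) : Int) 1).foldl aStep (l0, 0)).1.length →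
        ¬(((PySem.List.pyRange 1 ((N - 1 : Nat) : Int) 1).foldl aStep (l0, 0)).1.getD k ' ' = '1' ∧
          ((PySem.List.pyRange 1 ((N - 1 : Nat) : Int) 1).foldl aStep (l0, 0)).1.getD (k + 1) ' ' = '1') := by
      rintro k hk ⟨a1, a2⟩
      rw [hLenF] at hk
      rcases Nat.lt_or_ge (k + 1) (N - 1) with hlt | hge
      · have hrun := hRunF k hlt a1 a2 (N - 1) (by omega) (le_refl _)
        have hz := hTopF hrun k (by omega)
        rw [a1] at hz
        exact absurd hz (by decide)
      · have hk1 : k + 1 = N - 1 := by omega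
        rw [hk1] at a2
        have hz := hTopF a2 k (by omega)
        rw [a1] at hz
        exact absurd hz (by decide)
    have hsp : sparseN (vC ((PySem.List.pyRange 1 ((N - 1 : Nat) : Int) 1).foldl aStep (l0, 0)).1) :=
      sparse_of_noadj _ hnadj
    refine ⟨vC ((PySem.List.pyRange 1 ((N - 1 : Nat) : Int) 1).foldl aStep (l0, 0)).1, ?_,
      hVloF, hsp, hVhiF⟩
    have hfne : ((PySem.List.pyRange 1 ((N - 1 : Nat) : Int) 1).foldl aStep (l0, 0)).1 ≠ [] := by
      intro h
      rw [h] at hLenF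
      simp at hLenF
      omega
    have hfok : ∀ c ∈ ((PySem.List.pyRange 1 ((N - 1 : Nat) : Int) 1).foldl aStep (l0, 0)).1,
        c = '0' ∨ c = '1' := by
      intro c hc
      obtain ⟨i, hi, rfl⟩ := List.getElem_of_mem hc
      have hh := hOkF i (by omega)
      rwa [List.getD_eq_getElem _ _ hi] at hh
    have hparse := parseBin2_val _ hfne hfok
    simp only [next_spare_number]
    rw [hbin, hrev, ← hl0, PySem.List.len_eq, ← hN,
      show ((N : Nat) : Int) - 1 = ((N - 1 : Nat) : Int) by omega,
      PySem.List.slice?_none_none_neg_one]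
    simp only [Option.getD_some]
    rw [hparse]
    rfl

-- ===== VERDICT (by name: the statement is the Claim_ definition above) =====
theorem next_spare_number_spec : Claim_equal_next_spare_number := by
  intro number _hdom hpre
  unfold Spec_next_spare_number
  have h0 : number = ((number.toNat : Nat) : Int) := (Int.toNat_of_nonneg hpre).symm
  obtain ⟨ra, hra, hga⟩ := afinal_good number.toNat
  obtain ⟨rb, hrb, hgb⟩ := alt_good number.toNat
  rw [h0, hra, hrb, GoodFor_unique hga hgb]
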